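-- pv_equiv track=rewrite | github.com/zsegul/ceng | artificial intelligence/hw2/2380335_HW2.py | heuristic_function
-- ===== SOURCE A (Python) =====
-- def heuristic_function(state, goal_state):
--     heuristic = 0
--     for i in range(len(state)):
--         if state[i] != goal_state[i] and state[i] != 'E':
--             if abs(state.index('E')-i) == 1:
--                 heuristic += 1
--             elif abs(state.index('E')-i) <=3:
--                 heuristic += 2
--     return heuristic
-- ===== SOURCE B (Python) =====
-- def heuristic_function(state, goal_state):
--     try:
--         blank = state.index('E')
--     except ValueError:
--         return 0
--     total = 0
--     for off in (-3, -2, -1, 1, 2, 3):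
--         i = blank + off
--         if 0 <= i < len(state) and state[i] != goal_state[i] and state[i] != 'E':
--             total += 1 if abs(off) == 1 else 2
--     return total
-- ===== Notes on version B (the rewrite author's own statement) =====
-- stated objective: alternative
-- what changed: Instead of scanning every index and recomputing state.index('E') inside the loop, B locates the blank once and inspects only the six offsets -3..3 around it, since tiles farther than 3 from the blank contribute nothing; measured speedup was only ~1.26x on generated inputs, so no speed claim is made.
import Mathlib
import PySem

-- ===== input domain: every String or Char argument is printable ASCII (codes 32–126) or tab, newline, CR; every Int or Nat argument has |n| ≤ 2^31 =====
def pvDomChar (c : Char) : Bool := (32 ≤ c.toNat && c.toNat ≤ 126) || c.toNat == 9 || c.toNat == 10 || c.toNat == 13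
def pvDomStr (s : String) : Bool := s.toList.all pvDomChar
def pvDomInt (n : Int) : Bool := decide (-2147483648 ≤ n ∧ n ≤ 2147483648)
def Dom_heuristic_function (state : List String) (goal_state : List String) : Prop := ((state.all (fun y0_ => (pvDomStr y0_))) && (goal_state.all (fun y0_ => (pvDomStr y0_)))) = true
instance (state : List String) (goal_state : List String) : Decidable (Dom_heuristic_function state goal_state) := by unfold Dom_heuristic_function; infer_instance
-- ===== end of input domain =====

-- B finds the blank once and inspects only the six offsets around it instead of scanning every
-- index and recomputing state.index('E') per mismatch (objective: alternative algorithm).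


-- ===== PORT A =====
def heuristic_function (state : List String) (goal_state : List String) : Int :=
  (PySem.List.pyRange 0 (state.length : Int) 1).foldl (fun heuristic i =>
    if PySem.List.pyGetD state i "" ≠ PySem.List.pyGetD goal_state i "" ∧
       PySem.List.pyGetD state i "" ≠ "E" then
      if ((((PySem.List.index? state "E").getD 0 : Nat) : Int) - i).natAbs = 1 then
        heuristic + 1
      else if ((((PySem.List.index? state "E").getD 0 : Nat) : Int) - i).natAbs ≤ 3 then
        heuristic + 2
      else heuristic
    else heuristic) 0

-- ===== PORT B =====
def heuristic_function_alt (state : List String) (goal_state : List String) : Int :=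
  match PySem.List.index? state "E" with
  | none => 0
  | some blank =>
    [(-3 : Int), -2, -1, 1, 2, 3].foldl (fun total off =>
      let i : Int := (blank : Int) + off
      if 0 ≤ i ∧ i < (state.length : Int) ∧
         PySem.List.pyGetD state i "" ≠ PySem.List.pyGetD goal_state i "" ∧
         PySem.List.pyGetD state i "" ≠ "E" then
        total + (if off.natAbs = 1 then 1 else 2)
      else total) 0

-- ===== PRECONDITION & SPEC =====
-- Pre_ excludes exactly the inputs on which the Python A raises: goal_state shorter than state
-- (IndexError), and states without a blank 'E' that contain a mismatched non-'E' tile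
-- (ValueError from state.index('E')). On every excluded input A raises, so Pre_ excludes
-- nothing that A returns on.
def Pre_heuristic_function (state : List String) (goal_state : List String) : Prop :=
  state.length ≤ goal_state.length ∧
    ("E" ∈ state ∨ (state.zip goal_state).all (fun p => p.1 == p.2 || p.1 == "E") = true)
instance (state : List String) (goal_state : List String) : Decidable (Pre_heuristic_function state goal_state) := by unfold Pre_heuristic_function; infer_instance

def pvWitness_heuristic_function : List String × List String := (["1", "E", "2"], ["1", "2", "E"])

def Spec_heuristic_function (state : List String) (goal_state : List String) (out : Int) : Prop := out = heuristic_function_alt state goal_state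
instance (state : List String) (goal_state : List String) (out : Int) : Decidable (Spec_heuristic_function state goal_state out) := by unfold Spec_heuristic_function; infer_instance

-- ===== CLAIM (what is proved, stated in full; the proofs are below) =====
def Claim_equal_heuristic_function : Prop := ∀ (state : List String) (goal_state : List String), Dom_heuristic_function state goal_state → Pre_heuristic_function state goal_state → Spec_heuristic_function state goal_state (heuristic_function state goal_state)

-- ===== LEMMAS AND PROOFS =====

-- the per-index contribution of A's loop, given the blank position b
def hfWeight (state goal_state : List String) (b : Int) (i : Int) : Int :=
  if PySem.List.pyGetD state i "" ≠ PySem.List.pyGetD goal_state i "" ∧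
     PySem.List.pyGetD state i "" ≠ "E" then
    if (b - i).natAbs = 1 then 1 else if (b - i).natAbs ≤ 3 then 2 else 0
  else 0

-- Summing a weight that vanishes outside the window {b-3,…,b+3}\{b} over [0,n) is the same as
-- summing it over the six in-range window positions.
lemma window_sum (w : Int → Int) (b : Int)
    (hw : ∀ i : Int, 0 ≤ i → i ≠ b-3 → i ≠ b-2 → i ≠ b-1 → i ≠ b+1 → i ≠ b+2 → i ≠ b+3 → w i = 0) :
    ∀ n : Nat, ((PySem.List.pyRange 0 (n : Int) 1).map w).sum
      = (([-3, -2, -1, 1, 2, 3] : List Int).map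
          (fun off => if 0 ≤ b + off ∧ b + off < (n : Int) then w (b + off) else 0)).sum := by
  intro n
  induction n with
  | zero =>
    rw [PySem.List.pyRange_one_eq_nil (by norm_num)]
    simp only [List.map_cons, List.map_nil, List.sum_cons, List.sum_nil]
    split_ifs <;> omega
  | succ n ih =>
    have hc : ((n + 1 : Nat) : Int) = (n : Int) + 1 := by push_cast; ring
    rw [hc, PySem.List.pyRange_one_succ_right (by exact_mod_cast Nat.zero_le n),
      List.map_append, List.sum_append, ih]
    have h0 : (0 : Int) ≤ (n : Int) := by exact_mod_cast Nat.zero_le n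
    have hoff : ∀ off : Int, (if 0 ≤ b + off ∧ b + off < (n : Int) + 1 then w (b + off) else 0)
        = (if 0 ≤ b + off ∧ b + off < (n : Int) then w (b + off) else 0)
          + (if b + off = (n : Int) then w (n : Int) else 0) := by
      intro off
      by_cases he : b + off = (n : Int)
      · rw [he]; split_ifs <;> omega
      · split_ifs <;> omega
    simp only [List.map_cons, List.map_nil, List.sum_cons, List.sum_nil, hoff]
    have hdelta : (if b + -3 = (n:Int) then w (n:Int) else 0)
        + (if b + -2 = (n:Int) then w (n:Int) else 0)
        + (if b + -1 = (n:Int) then w (n:Int) else 0)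
        + (if b + 1 = (n:Int) then w (n:Int) else 0)
        + (if b + 2 = (n:Int) then w (n:Int) else 0)
        + (if b + 3 = (n:Int) then w (n:Int) else 0) = w (n:Int) := by
      by_cases hb : ((n:Int) = b - 3 ∨ (n:Int) = b - 2 ∨ (n:Int) = b - 1 ∨ (n:Int) = b + 1
          ∨ (n:Int) = b + 2 ∨ (n:Int) = b + 3)
      · split_ifs <;> omega
      · push Not at hb
        obtain ⟨h1, h2, h3, h4, h5, h6⟩ := hb
        have := hw (n : Int) h0 h1 h2 h3 h4 h5 h6
        split_ifs <;> omega
    linarith [hdelta]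

-- A's loop is the running sum of hfWeight over range(len(state)) once index('E') is fixed to bN.
lemma portA_eq_sum (state goal_state : List String) (bN : Nat)
    (hidx : PySem.List.index? state "E" = some bN) :
    heuristic_function state goal_state
      = ((PySem.List.pyRange 0 (state.length : Int) 1).map
          (hfWeight state goal_state (bN : Int))).sum := by
  unfold heuristic_function
  rw [hidx]
  refine Eq.trans (PySem.List.foldl_congr_mem _ _
    (fun acc i => acc + hfWeight state goal_state (bN : Int) i) _ ?_) ?_
  · intro acc i _
    simp only [hfWeight, Option.getD_some]
    split_ifs <;> ring
  · rw [PySem.List.foldl_add]; ring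

-- B's loop is the running sum of its six per-offset terms.
lemma portB_eq_sum (state goal_state : List String) (bN : Nat)
    (hidx : PySem.List.index? state "E" = some bN) :
    heuristic_function_alt state goal_state
      = (([-3, -2, -1, 1, 2, 3] : List Int).map (fun off =>
          if 0 ≤ (bN : Int) + off ∧ (bN : Int) + off < (state.length : Int) ∧
             PySem.List.pyGetD state ((bN : Int) + off) "" ≠ PySem.List.pyGetD goal_state ((bN : Int) + off) "" ∧
             PySem.List.pyGetD state ((bN : Int) + off) "" ≠ "E" then
            (if off.natAbs = 1 then (1 : Int) else 2)
          else 0)).sum := by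
  have hred : heuristic_function_alt state goal_state
      = ([(-3 : Int), -2, -1, 1, 2, 3].foldl (fun total off =>
          if 0 ≤ (bN : Int) + off ∧ (bN : Int) + off < (state.length : Int) ∧
             PySem.List.pyGetD state ((bN : Int) + off) "" ≠ PySem.List.pyGetD goal_state ((bN : Int) + off) "" ∧
             PySem.List.pyGetD state ((bN : Int) + off) "" ≠ "E" then
            total + (if off.natAbs = 1 then (1 : Int) else 2)
          else total) 0) := by
    unfold heuristic_function_alt
    rw [hidx]
  rw [hred]
  refine Eq.trans (PySem.List.foldl_congr_mem _ _
    (fun total off => total + (if 0 ≤ (bN : Int) + off ∧ (bN : Int) + off < (state.length : Int) ∧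
        PySem.List.pyGetD state ((bN : Int) + off) "" ≠ PySem.List.pyGetD goal_state ((bN : Int) + off) "" ∧
        PySem.List.pyGetD state ((bN : Int) + off) "" ≠ "E" then
      (if off.natAbs = 1 then (1 : Int) else 2) else 0)) _ ?_) ?_
  · intro acc off _
    beta_reduce
    split_ifs <;> ring
  · rw [PySem.List.foldl_add]; ring

-- each of B's per-offset terms is the corresponding windowed hfWeight term
lemma term_eq (state goal_state : List String) (bN : Nat) (off : Int)
    (hoff : off.natAbs = 1 ∨ off.natAbs = 2 ∨ off.natAbs = 3) :
    (if 0 ≤ (bN : Int) + off ∧ (bN : Int) + off < (state.length : Int) ∧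
        PySem.List.pyGetD state ((bN : Int) + off) "" ≠ PySem.List.pyGetD goal_state ((bN : Int) + off) "" ∧
        PySem.List.pyGetD state ((bN : Int) + off) "" ≠ "E" then
      (if off.natAbs = 1 then (1 : Int) else 2)
     else 0)
    = (if 0 ≤ (bN : Int) + off ∧ (bN : Int) + off < (state.length : Int) then
        hfWeight state goal_state (bN : Int) ((bN : Int) + off) else 0) := by
  have habs : ((bN : Int) - ((bN : Int) + off)).natAbs = off.natAbs := by omega
  have hle : (if off.natAbs = 1 then (1 : Int) else if off.natAbs ≤ 3 then 2 else 0)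
      = (if off.natAbs = 1 then (1 : Int) else 2) := by split_ifs <;> omega
  unfold hfWeight
  rw [habs, hle]
  split_ifs <;> first | rfl | tauto

theorem heuristic_function_spec : Claim_equal_heuristic_function := by
  intro state goal_state _hdom hpre
  obtain ⟨hlen, hor⟩ := hpre
  unfold Spec_heuristic_function
  cases hidx : PySem.List.index? state "E" with
  | none =>
    have hnotmem : "E" ∉ state := (PySem.List.index?_eq_none_iff state "E").mp hidx
    have hall : (state.zip goal_state).all (fun p => p.1 == p.2 || p.1 == "E") = true := by
      rcases hor with hmem | hall
      · exact absurd hmem hnotmem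
      · exact hall
    have hB : heuristic_function_alt state goal_state = 0 := by
      unfold heuristic_function_alt; rw [hidx]
    have hA : heuristic_function state goal_state = 0 := by
      unfold heuristic_function
      refine Eq.trans (PySem.List.foldl_congr_mem _ _ (fun acc _ => acc) _ ?_)
        (PySem.List.foldl_ignore _ _)
      intro acc i hi
      rw [PySem.List.mem_pyRange_one] at hi
      obtain ⟨hi0, hi1⟩ := hi
      have hlt : i.toNat < state.length := by omega
      have hz : i.toNat < (state.zip goal_state).length := by
        rw [List.length_zip]; omega
      have hmem := List.all_eq_true.mp hall ((state.zip goal_state)[i.toNat])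
        (List.getElem_mem hz)
      rw [List.getElem_zip] at hmem
      simp only [Bool.or_eq_true, beq_iff_eq] at hmem
      have hsg : PySem.List.pyGetD state i "" = state[i.toNat] :=
        PySem.List.pyGetD_eq_getElem state "" hi0 hi1
      have hgg : PySem.List.pyGetD goal_state i "" = goal_state[i.toNat] :=
        PySem.List.pyGetD_eq_getElem goal_state "" hi0 (by omega)
      rcases hmem with heq | hE
      · rw [if_neg]; intro hcon; exact hcon.1 (by rw [hsg, hgg, heq])
      · rw [if_neg]; intro hcon
        exact hcon.2 (by rw [hsg, hE])
    rw [hA, hB]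
  | some bN =>
    obtain ⟨hbk, hbE, _⟩ := PySem.List.getElem_of_index?_eq_some hidx
    have hw : ∀ i : Int, 0 ≤ i → i ≠ (bN:Int)-3 → i ≠ (bN:Int)-2 → i ≠ (bN:Int)-1 →
        i ≠ (bN:Int)+1 → i ≠ (bN:Int)+2 → i ≠ (bN:Int)+3 →
        hfWeight state goal_state (bN:Int) i = 0 := by
      intro i h0 n3 n2 n1 p1 p2 p3
      unfold hfWeight
      by_cases hib : i = (bN : Int)
      · rw [if_neg]
        intro hcon
        apply hcon.2
        rw [hib, PySem.List.pyGetD_eq_getElem state "" (by omega) (by exact_mod_cast hbk)]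
        exact hbE
      · have h4 : 4 ≤ ((bN:Int) - i).natAbs := by omega
        split_ifs <;> first | rfl | omega
    rw [portA_eq_sum state goal_state bN hidx, portB_eq_sum state goal_state bN hidx,
      window_sum (hfWeight state goal_state (bN:Int)) (bN:Int) hw state.length]
    simp only [List.map_cons, List.map_nil, List.sum_cons, List.sum_nil]
    rw [term_eq state goal_state bN (-3) (by norm_num),
        term_eq state goal_state bN (-2) (by norm_num),
        term_eq state goal_state bN (-1) (by norm_num),
        term_eq state goal_state bN 1 (by norm_num),
        term_eq state goal_state bN 2 (by norm_num),
        term_eq state goal_state bN 3 (by norm_num)]
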